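-- pv_equiv track=rewrite | github.com/varshagoalla/Inverted_Index_Creation | invidx_cons.py | c1
-- ===== SOURCE A (Python) =====
-- def zeros(l):
--     s=""
--     for i in range(l):
--         s=s+"0"
--     return s
--
-- def c1(s):
--     num_chunks = int(len(s)/7)
--     if len(s) % 7 !=0:
--         num_chunks+=1
--     r = ""
--     end = len(s)
--     for i in range(num_chunks):
--         if end-7<0:
--             r= zeros(7-end)+s[0:end]+r
--         else:
--             r=s[end-7:end]+r
--         end = end-7
--         if i ==0:
--             r= "0"+r
--         else:
--             r= "1"+r
--     return r
-- ===== SOURCE B (Python) =====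
-- def c1(s):
--     pad = (7 - len(s) % 7) % 7
--     padded = "0" * pad + s
--     chunks = [padded[i:i+7] for i in range(0, len(padded), 7)]
--     out = []
--     for j, ch in enumerate(chunks):
--         out.append(("0" if j == len(chunks) - 1 else "1") + ch)
--     return "".join(out)
-- ===== Notes on version B (the rewrite author's own statement) =====
-- stated objective: faster
-- what changed: A walks the string right-to-left, slicing 7 chars off the end each iteration, prepending each control bit and chunk to the front of the accumulator string and building the zero padding with a loop inside the final iteration; B computes the left zero-padding once up front, then makes one forward pass collecting the 7-char chunks and joins them once, with the lone-zero control bit on the last chunk only.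
import Mathlib
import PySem

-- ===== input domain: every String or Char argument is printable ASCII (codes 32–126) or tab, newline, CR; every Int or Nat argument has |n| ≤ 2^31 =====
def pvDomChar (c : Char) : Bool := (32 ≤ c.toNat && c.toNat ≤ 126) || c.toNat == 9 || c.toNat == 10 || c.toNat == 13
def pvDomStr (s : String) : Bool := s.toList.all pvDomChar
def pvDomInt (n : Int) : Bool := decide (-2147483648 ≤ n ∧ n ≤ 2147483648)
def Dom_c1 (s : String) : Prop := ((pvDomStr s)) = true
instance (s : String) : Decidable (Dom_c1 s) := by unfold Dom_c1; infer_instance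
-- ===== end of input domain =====

-- B replaces A's right-to-left iterate-and-prepend loop (whose string prepends are
-- quadratic) by computing the left padding once and making a single forward pass over
-- the 7-char chunks, joined once (objective: faster; return values are identical).

-- ===== PORT A =====
def c1zeros (l : Int) : List Char :=
  (PySem.List.pyRange 0 l 1).foldl (fun s _ => s ++ ['0']) []

-- ===== PORT B is below; first A =====
def c1 (s : String) : String :=
  let cs := s.toList
  let n : Int := PySem.List.len cs
  let nc0 : Int := PySem.Int.truncdiv n 7
  let numChunks : Int := if PySem.Int.mod n 7 ≠ 0 then nc0 + 1 else nc0
  let st := (PySem.List.pyRange 0 numChunks 1).foldl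
    (fun (st : List Char × Int) i =>
      let r := st.1
      let e := st.2
      let r := if e - 7 < 0 then
          c1zeros (7 - e) ++ PySem.List.slice cs (some 0) (some e) ++ r
        else
          PySem.List.slice cs (some (e - 7)) (some e) ++ r
      let e := e - 7
      let r := if i = 0 then '0' :: r else '1' :: r
      (r, e))
    (([] : List Char), n)
  String.ofList st.1

-- ===== PORT B =====
def c1_alt (s : String) : String :=
  let cs := s.toList
  let pad : Int := PySem.Int.mod (7 - PySem.Int.mod (PySem.List.len cs) 7) 7
  let padded := List.replicate pad.toNat '0' ++ cs
  let chunks := (PySem.List.pyRange 0 (PySem.List.len padded) 7).map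
    (fun i => PySem.List.slice padded (some i) (some (i + 7)))
  let out := (PySem.List.enumerate chunks).foldl
    (fun (acc : List (List Char)) jc =>
      acc ++ [(if jc.1 = PySem.List.len chunks - 1 then '0' else '1') :: jc.2])
    []
  String.ofList out.flatten

-- ===== PRECONDITION & SPEC =====
-- A is total on every string, so no Pre_ is needed.
def Spec_c1 (s : String) (out : String) : Prop := out = c1_alt s
instance (s : String) (out : String) : Decidable (Spec_c1 s out) := by unfold Spec_c1; infer_instance

-- ===== CLAIM (what is proved, stated in full; the proofs are below) =====
def Claim_equal_c1 : Prop := ∀ (s : String), Dom_c1 s → Spec_c1 s (c1 s)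
-- ===== LEMMAS AND PROOFS =====

def chunkA (cs : List Char) (e : Int) : List Char :=
  if e - 7 < 0 then c1zeros (7 - e) ++ PySem.List.slice cs (some 0) (some e)
  else PySem.List.slice cs (some (e - 7)) (some e)
def GA (cs : List Char) : Nat → Int → List Char
  | 0, _ => []
  | k + 1, e => GA cs k (e - 7) ++ '1' :: chunkA cs e

theorem GA_succ_left (cs : List Char) (k : Nat) (e : Int) :
    GA cs (k + 1) e = ('1' :: chunkA cs (e - 7 * k)) ++ GA cs k e := by
  induction k generalizing e with
  | zero => simp [GA]
  | succ k ih =>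
    show GA cs (k+1) (e-7) ++ '1' :: chunkA cs e = _
    rw [ih (e - 7)]
    have h7 : e - 7 - 7 * (k:Int) = e - 7 * ((k:Nat)+1:Nat) := by push_cast; ring
    simp [GA, h7]

def chunkL : Nat → List Char → List (List Char)
  | 0, _ => []
  | k + 1, p => p.take 7 :: chunkL k (p.drop 7)
def canonC : List (List Char) → List Char
  | [] => []
  | [c] => '0' :: c
  | c :: c' :: cl => ('1' :: c) ++ canonC (c' :: cl)

theorem zl {α : Type} (l : List α) (acc : List Char) :
    l.foldl (fun s _ => s ++ ['0']) acc = acc ++ List.replicate l.length '0' := by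
  induction l generalizing acc with
  | nil => simp
  | cons x xs ih => simp [List.foldl_cons, ih, List.replicate_succ]

theorem c1zeros_eval (l : Int) : c1zeros l = List.replicate l.toNat '0' := by
  rw [c1zeros, zl, PySem.List.length_pyRange_one]
  simp

theorem chunkA_shift (cs : List Char) (d e : Int) (hd : 0 ≤ d) (h : d + 7 ≤ e) :
    chunkA cs e = chunkA (cs.drop d.toNat) (e - d) := by
  rw [chunkA, chunkA, if_neg (by omega), if_neg (by omega),
      PySem.List.slice_toNat _ (by omega) (by omega),
      PySem.List.slice_toNat _ (by omega) (by omega), List.drop_drop]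
  congr 1
  · omega
  · congr 1
    omega

theorem GA_shift (cs : List Char) (k : Nat) (e d : Int) (hd : 0 ≤ d)
    (h : d + 7 * k ≤ e) :
    GA cs k e = GA (cs.drop d.toNat) k (e - d) := by
  induction k generalizing e with
  | zero => simp [GA]
  | succ k ih =>
    rw [GA, GA, ih (e - 7) (by push_cast at h ⊢; omega),
        chunkA_shift cs d e hd (by push_cast at h; omega),
        show e - 7 - d = e - d - 7 from by ring]

-- leftmost (possibly padded) chunk: chunkA at its end equals take 7 of the padded list
theorem chunkA_left (cs : List Char) (e : Int) (he1 : 1 ≤ e) (he7 : e ≤ 7)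
    (hlen : e ≤ (cs.length : Int)) :
    chunkA cs e = (List.replicate (7 - e.toNat) '0' ++ cs).take 7 := by
  rw [chunkA, List.take_append, List.length_replicate,
      List.take_replicate]
  by_cases h7 : e = 7
  · subst h7
    rw [if_neg (by omega)]
    rw [PySem.List.slice_toNat _ (by omega) (by omega)]
    norm_num
    omega
  · rw [if_pos (by omega), c1zeros_eval]
    rw [PySem.List.slice_zero_start, PySem.List.slice_to _ (by omega)]
    congr 1
    · congr 1
      omega
    · congr 1
      omega

theorem A_main (κ : Nat) (cs : List Char)
    (h1 : 7 * κ < cs.length) (h2 : cs.length ≤ 7 * (κ + 1)) :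
    GA cs κ ((cs.length : Int) - 7) ++ '0' :: chunkA cs (cs.length : Int)
      = canonC (chunkL (κ + 1) (List.replicate (7 * (κ + 1) - cs.length) '0' ++ cs)) := by
  induction κ generalizing cs with
  | zero =>
    rw [GA, List.nil_append, chunkL, chunkL, canonC,
        chunkA_left cs _ (by omega) (by omega) (by omega)]
    norm_num
  | succ κ ih =>
    have hN : 7 * (κ + 1) < cs.length := h1
    set N : Nat := cs.length with hNdef
    have he' : (1:Int) ≤ (N:Int) - 7*(κ+1) := by push_cast; omega
    rw [GA_succ_left,
        show ((N:Int) - 7) - 7*(κ:Nat) = ((N:Int) - 7*((κ:Nat)+1)) from by push_cast; ring]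
    set e : Int := (N:Int) - 7*((κ:Nat)+1) with hedef
    have he7 : e ≤ 7 := by rw [hedef]; push_cast; omega
    have heN : e ≤ (N:Int) := by rw [hedef]; push_cast; omega
    rw [chunkA_left cs e (by omega) he7 heN]
    rw [GA_shift cs κ ((N:Int)-7) e (by omega) (by push_cast; omega),
        chunkA_shift cs e (N:Int) (by omega) (by push_cast; omega)]
    set cs' : List Char := cs.drop e.toNat with hcs'
    have hlen' : cs'.length = 7 * (κ + 1) := by
      rw [hcs', List.length_drop]; omega
    have hrw1 : (N:Int) - 7 - e = (cs'.length : Int) - 7 := by rw [hlen']; push_cast; omega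
    have hrw2 : (N:Int) - e = (cs'.length : Int) := by rw [hlen']; push_cast; omega
    rw [hrw1, hrw2, List.append_assoc, ih cs' (by omega) (by omega)]
    -- right-hand side
    rw [chunkL, chunkL]
    have hpad : 7 * (κ + 1 + 1) - N = 7 - e.toNat := by omega
    have hdrop : (List.replicate (7 * (κ + 1 + 1) - N) '0' ++ cs).drop 7 = cs' := by
      rw [hpad, List.drop_append, List.drop_replicate, hcs']
      simp
      congr 1
      omega
    have htake : (List.replicate (7 * (κ + 1 + 1) - N) '0' ++ cs).take 7
        = (List.replicate (7 - e.toNat) '0' ++ cs).take 7 := by rw [hpad]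
    rw [hdrop, htake, show (7*(κ+1) - cs'.length) = 0 from by omega, List.replicate_zero,
        List.nil_append]
    rw [show chunkL (κ+1) cs' = cs'.take 7 :: chunkL κ (cs'.drop 7) from rfl]
    simp [canonC]

theorem B_enum (cl : List (List Char)) (s m : Int) (hm : m = s + cl.length) :
    ((PySem.List.enumerate cl s).map
      (fun jc => (if jc.1 = m - 1 then '0' else '1') :: jc.2)).flatten = canonC cl := by
  induction cl generalizing s with
  | nil => simp [canonC]
  | cons c cl ih =>
    rw [PySem.List.enumerate_cons, List.map_cons, List.flatten_cons]
    cases cl with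
    | nil =>
      rw [if_pos (by simp at hm; omega)]
      simp [canonC]
    | cons c' cl' =>
      rw [if_neg (by simp at hm; omega), ih (s+1) (by simp at hm ⊢; omega)]
      simp [canonC]

theorem B_chunks_aux (k : Nat) (p : List Char) :
    (List.range k).map (fun (j : Nat) => PySem.List.slice p (some (7 * (j : Int))) (some (7 * (j : Int) + 7)))
    = chunkL k p := by
  induction k generalizing p with
  | zero => simp [chunkL]
  | succ k ih =>
    rw [List.range_succ_eq_map, List.map_cons, List.map_map, chunkL]
    have h0 : PySem.List.slice p (some (7 * ((0:Nat) : Int))) (some (7 * ((0:Nat) : Int) + 7))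
        = p.take 7 := by
      have := PySem.List.slice_to p (b := 7) (by omega)
      simp_all
    rw [h0]
    congr 1
    rw [← ih (p.drop 7)]
    apply List.map_congr_left
    intro j hj
    simp only [Function.comp]
    rw [PySem.List.slice_toNat _ (by omega) (by omega),
        PySem.List.slice_toNat _ (by omega) (by omega), List.drop_drop]
    congr 1
    · omega
    · congr 1
      omega

theorem B_chunks (k : Nat) (p : List Char) :
    (PySem.List.pyRange 0 (7 * (k : Int)) 7).map
      (fun i => PySem.List.slice p (some i) (some (i + 7)))
    = chunkL k p := by
  rw [PySem.List.pyRange_of_pos _ _ (by omega), List.map_map]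
  have hc : (List.range (if (0:Int) < 7*(k:Int) then ((7 * (k:Int) - 0 + 7 - 1) / 7).toNat else 0))
      = List.range k := by
    congr 1
    split_ifs with h
    · omega
    · omega
  rw [hc, ← B_chunks_aux k p]
  apply List.map_congr_left
  intro j hj
  simp [Function.comp]

theorem chunkL_length (k : Nat) (p : List Char) : (chunkL k p).length = k := by
  induction k generalizing p with
  | zero => rfl
  | succ k ih => simp [chunkL, ih]

theorem loopA (cs : List Char) (k : Nat) (e0 : Int) (r0 : List Char) :
    (PySem.List.pyRange 1 (1 + (k : Int)) 1).foldl
      (fun (st : List Char × Int) i =>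
        let r := st.1
        let e := st.2
        let r := if e - 7 < 0 then
            c1zeros (7 - e) ++ PySem.List.slice cs (some 0) (some e) ++ r
          else
            PySem.List.slice cs (some (e - 7)) (some e) ++ r
        let e := e - 7
        let r := if i = 0 then '0' :: r else '1' :: r
        (r, e))
      (r0, e0)
    = (GA cs k e0 ++ r0, e0 - 7 * k) := by
  induction k generalizing e0 r0 with
  | zero => simp [PySem.List.pyRange_one_eq_nil, GA]
  | succ k ih =>
    have : (1 : Int) + (k+1 : Nat) = (1 + (k:Int)) + 1 := by push_cast; ring
    rw [this, PySem.List.pyRange_one_succ_right (by omega), List.foldl_append, ih]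
    have hne : (1 + (k:Int)) ≠ 0 := by omega
    simp only [List.foldl_cons, List.foldl_nil, hne, if_false, GA_succ_left]
    refine Prod.ext ?_ (by push_cast; ring)
    show _ = '1' :: chunkA cs (e0 - 7 * (k:Int)) ++ GA cs k e0 ++ r0
    rw [chunkA]
    split_ifs <;> simp [List.append_assoc]

-- ===== VERDICT (by name: the statement is the Claim_ definition above) =====
theorem c1_spec : Claim_equal_c1 := by
  unfold Claim_equal_c1
  intro s _
  unfold Spec_c1
  by_cases h0 : s.toList.length = 0
  · have hcs : s.toList = [] := List.eq_nil_of_length_eq_zero h0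
    simp only [c1, c1_alt, hcs]
    decide
  · set cs := s.toList with hcs
    set N := cs.length with hN
    set κ : Nat := (N + 6) / 7 - 1 with hκ
    have hb1 : 7 * κ < N := by omega
    have hb2 : N ≤ 7 * (κ + 1) := by omega
    -- numChunks = κ + 1
    have hmodN : PySem.Int.mod (N:Int) 7 = ((N % 7 : Nat) : Int) := by
      exact_mod_cast PySem.Int.mod_natCast N 7
    have hdivN : PySem.Int.truncdiv (N:Int) 7 = ((N / 7 : Nat) : Int) := by
      simp [PySem.Int.truncdiv]
    have hnum : (if PySem.Int.mod (PySem.List.len cs) 7 ≠ 0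
        then PySem.Int.truncdiv (PySem.List.len cs) 7 + 1
        else PySem.Int.truncdiv (PySem.List.len cs) 7) = ((κ + 1 : Nat) : Int) := by
      rw [PySem.List.len_eq, ← hN, hmodN, hdivN]
      by_cases hm : N % 7 = 0
      · rw [if_neg (by simp [hm])]
        push_cast
        omega
      · rw [if_pos (by exact_mod_cast hm)]
        push_cast
        omega
    -- A side
    have hA : c1 s = String.ofList
        (((PySem.List.pyRange 0
            (if PySem.Int.mod (PySem.List.len cs) 7 ≠ 0
              then PySem.Int.truncdiv (PySem.List.len cs) 7 + 1
              else PySem.Int.truncdiv (PySem.List.len cs) 7) 1).foldl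
          (fun (st : List Char × Int) i =>
            let r := st.1
            let e := st.2
            let r := if e - 7 < 0 then
                c1zeros (7 - e) ++ PySem.List.slice cs (some 0) (some e) ++ r
              else
                PySem.List.slice cs (some (e - 7)) (some e) ++ r
            let e := e - 7
            let r := if i = 0 then '0' :: r else '1' :: r
            (r, e))
          (([] : List Char), PySem.List.len cs)).1) := rfl
    rw [hnum, show (PySem.List.len cs) = (N : Int) from by rw [PySem.List.len_eq, hN]] at hA
    rw [PySem.List.pyRange_one_cons (by omega), List.foldl_cons] at hA
    have hstep : (let r := (([] : List Char), (N:Int)).1;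
        let e := (([] : List Char), (N:Int)).2;
        let r := if e - 7 < 0 then
            c1zeros (7 - e) ++ PySem.List.slice cs (some 0) (some e) ++ r
          else
            PySem.List.slice cs (some (e - 7)) (some e) ++ r;
        let e := e - 7;
        let r := if (0:Int) = 0 then '0' :: r else '1' :: r;
        (r, e)) = ('0' :: chunkA cs (N:Int), (N:Int) - 7) := by
      simp only [chunkA]
      split_ifs <;> simp
    rw [hstep, show (0:Int) + 1 = 1 from by norm_num,
        show ((κ + 1 : Nat) : Int) = 1 + (κ : Int) from by push_cast; ring,
        loopA] at hA
    rw [hA]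
    -- B side
    set pad : Int := PySem.Int.mod (7 - PySem.Int.mod (PySem.List.len cs) 7) 7 with hpaddef
    have hpad : pad.toNat = 7 * (κ + 1) - N := by
      rw [hpaddef, PySem.List.len_eq, ← hN, hmodN,
          show (7 - ((N % 7 : Nat) : Int)) = ((7 - N % 7 : Nat) : Int) from by push_cast; omega]
      rw [show ((7:Int)) = ((7:Nat):Int) from by norm_num]
      rw [PySem.Int.mod_natCast]
      omega
    set padded : List Char := List.replicate pad.toNat '0' ++ cs with hpadded
    have hplen : padded.length = 7 * (κ + 1) := by
      rw [hpadded, List.length_append, List.length_replicate, hpad]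
      omega
    have hB : c1_alt s = String.ofList (canonC (chunkL (κ + 1) padded)) := by
      rw [c1_alt]
      simp only [← hcs, ← hpaddef, ← hpadded]
      rw [show (PySem.List.len padded) = ((7 * ((κ + 1 : Nat) : Int))) from by
            rw [PySem.List.len_eq, hplen]; push_cast; ring]
      rw [B_chunks (κ + 1) padded]
      rw [PySem.List.foldl_append_singleton_eq_map, List.nil_append]
      rw [B_enum (chunkL (κ + 1) padded) 0
            (PySem.List.len (chunkL (κ + 1) padded))
            (by rw [PySem.List.len_eq, chunkL_length]; omega)]
    rw [hB, A_main κ cs hb1 hb2]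
    rw [show 7 * (κ + 1) - cs.length = pad.toNat from by omega, ← hpadded]
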